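-- pv_equiv track=rewrite | github.com/Sheel-ui/Analysis-of-Algorithms | Project II/app.py | alg7b
-- ===== SOURCE A (Python) =====
-- def transformList(i,j,k_list):
--     # transforming the perspective of 0s according to index of current element
--     return [(k[0]-i,k[1]-j) for k in k_list if (k[0] -i >=0 and k[1]-j>=0)]
--
-- def alg7b(matrix,h,k):
--     matrix = [[0 if i<h else 1 for i in j] for j in matrix]
--     m = len(matrix)
--     n = len(matrix[0])
--     k_list = []
--     dp = [[0]*n for i in range(m)]
--     for i in range(m):
--         for j in range(n):
--             if matrix[i][j]==0:
--                 k_list.append((i,j))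
--     prefixSum = [[0] * (n + 1) for _ in range(m + 1)]
--     for i in range(1, m + 1):
--         for j in range(1, n + 1):
--             # populating the values of prefixsum FP
--             prefixSum[i][j] = prefixSum[i - 1][j] + prefixSum[i][j - 1] - prefixSum[i - 1][j - 1] + matrix[i - 1][j - 1]
--     for i in range(m):
--         for j in range(n):
--             # above two for loops to select an element in matrix
--             flag = False
--             max_size = 0
--             max_zeros = m*n+1
--             for z in transformList(i,j,k_list):
--                 # above for loop for selecting k zeros that are allowd
--                 size = max(z[0],z[1]) + 1
--                 if i+size <= m and j+size <= n:
--                     # for every element checking the subsquare sum is 0s less than allowed k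
--                     # using precomputed DP matrix to get the sub square sum
--                     subSquareSum = prefixSum[i+size][j+size] - prefixSum[i][j+size] - prefixSum[i+size][j] + prefixSum[i][j]
--                     zeros = size*size-subSquareSum
--                     if zeros>k and zeros<max_zeros:
--                         flag=True
--                         max_size = size
--                         max_zeros = zeros
--             if not flag:
--                 dp[i][j]=min(m-i,n-j)
--             else:
--                 dp[i][j]=max_size-1
--     x,y,size=0,0,0
--     for i in range(m):
--         for j in range(n):
--             # single pass to get the max solution
--             if dp[i][j]>=size:
--                 x,y=i+1,j+1
--                 size = dp[i][j]
--
--     if x+size-1 >= x or y+size-1 >= y: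
--         return x,y, x+size-1, y+size-1
--     else:
--         return None, None, None, None
-- ===== SOURCE B (Python) =====
-- def alg7b(matrix, h, k):
--     # Largest square with at most k entries < h: per-cell binary search on the side
--     # length over a zero-count prefix table built by 1D row scans + column zips,
--     # then max and a reverse scan for its last position (objective: faster).
--     m = len(matrix)
--     n = len(matrix[0])
--     kk = k if k > 0 else 0
--     P = [[0] * (n + 1)]
--     for row in matrix:
--         acc, rp = 0, [0]
--         for v in row[:n]:
--             acc += 1 if v < h else 0
--             rp.append(acc)
--         P.append([a + b for a, b in zip(P[-1], rp)])
--
--     def side(i, j):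
--         lo, hi = 0, min(m - i, n - j)
--         while lo < hi:
--             mid = (lo + hi + 1) // 2
--             if P[i + mid][j + mid] - P[i][j + mid] - P[i + mid][j] + P[i][j] <= kk:
--                 lo = mid
--             else:
--                 hi = mid - 1
--         return lo
--
--     S = [[side(i, j) for j in range(n)] for i in range(m)]
--     M = 0
--     for row in S:
--         for v in row:
--             if v > M:
--                 M = v
--     if M == 0:
--         return None, None, None, None
--     for i in reversed(range(m)):
--         for j in reversed(range(n)):
--             if S[i][j] == M:
--                 return i + 1, j + 1, i + M, j + M
-- ===== Notes on version B (the rewrite author's own statement) =====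
-- stated objective: faster
-- what changed: Replaces A's per-cell scan over the whole list of zero positions (re-filtered for every cell) by a per-cell binary search on the side length over a zero-count prefix table built by 1D row scans and column zips, and replaces A's running best-so-far pass by a plain max followed by a reverse scan for its last position.
import Mathlib
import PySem

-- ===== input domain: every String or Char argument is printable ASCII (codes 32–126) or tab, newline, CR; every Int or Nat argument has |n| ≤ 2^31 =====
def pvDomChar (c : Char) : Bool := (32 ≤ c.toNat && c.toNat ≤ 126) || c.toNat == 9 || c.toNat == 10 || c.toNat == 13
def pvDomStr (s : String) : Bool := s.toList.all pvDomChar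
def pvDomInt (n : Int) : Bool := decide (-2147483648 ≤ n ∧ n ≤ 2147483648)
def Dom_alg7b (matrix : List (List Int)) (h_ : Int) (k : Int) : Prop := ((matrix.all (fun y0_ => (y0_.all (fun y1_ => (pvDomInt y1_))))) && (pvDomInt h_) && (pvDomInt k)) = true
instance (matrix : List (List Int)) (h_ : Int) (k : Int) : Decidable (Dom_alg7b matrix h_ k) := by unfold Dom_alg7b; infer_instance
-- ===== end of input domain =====

-- B replaces A's per-cell scan over the full list of zero positions by a per-cell binary
-- search on the side length over a prefix table built by row scans and column zips, and
-- replaces A's running best-so-far pass by a max plus a reverse scan (objective: faster).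

-- ===== PORT A =====
def transformList (i j : Int) (k_list : List (Int × Int)) : List (Int × Int) :=
  (k_list.filter (fun z => decide (0 ≤ z.1 - i) && decide (0 ≤ z.2 - j))).map
    (fun z => (z.1 - i, z.2 - j))

def prefRowA (prev : List Int) (binRow : List Int) (n : Nat) : List Int :=
  (List.range n).foldl
    (fun row j => row ++ [prev.getD (j+1) 0 + row.getD j 0 - prev.getD j 0 + binRow.getD j 0])
    [0]

def prefA (bin : List (List Int)) (n : Nat) (m : Nat) : List (List Int) :=
  (List.range m).foldl (fun acc i => acc ++ [prefRowA (acc.getD i []) (bin.getD i []) n])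
    [List.replicate (n+1) 0]

def stepA (pref : List (List Int)) (m n : Nat) (k : Int) (i j : Nat)
    (st : Bool × Int × Int) (z : Int × Int) : Bool × Int × Int :=
  let size := max z.1 z.2 + 1
  if (i : Int) + size ≤ (m : Int) ∧ (j : Int) + size ≤ (n : Int) then
    let sub := (pref.getD ((i : Int) + size).toNat []).getD (((j : Int) + size).toNat) 0
             - (pref.getD i []).getD (((j : Int) + size).toNat) 0
             - (pref.getD ((i : Int) + size).toNat []).getD j 0
             + (pref.getD i []).getD j 0
    let zeros := size * size - sub
    if zeros > k ∧ zeros < st.2.2 then (true, size, zeros) else st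
  else st

def innerA (pref : List (List Int)) (m n : Nat) (k : Int) (i j : Nat) (L : List (Int × Int)) :
    Bool × Int × Int :=
  L.foldl (stepA pref m n k i j) (false, 0, (m : Int) * (n : Int) + 1)

def klistA (mat : List (List Int)) (m n : Nat) : List (Int × Int) :=
  (List.range m).foldl (fun acc i =>
    (List.range n).foldl (fun acc j =>
      if (mat.getD i []).getD j 0 == 0 then acc ++ [((i : Int), (j : Int))] else acc) acc) []

def dpA (pref : List (List Int)) (m n : Nat) (k : Int) (kl : List (Int × Int)) : List (List Int) :=
  (List.range m).map (fun i => (List.range n).map (fun j =>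
    let st := innerA pref m n k i j (transformList i j kl)
    if !st.1 then min ((m : Int) - i) ((n : Int) - j) else st.2.1 - 1))

def finA (dp : List (List Int)) (m n : Nat) : Int × Int × Int :=
  (List.range m).foldl (fun st i => (List.range n).foldl (fun (st : Int × Int × Int) j =>
      if (dp.getD i []).getD j 0 ≥ st.2.2 then ((i : Int) + 1, (j : Int) + 1, (dp.getD i []).getD j 0)
      else st) st) ((0 : Int), (0 : Int), (0 : Int))

def alg7b (matrix : List (List Int)) (h_ : Int) (k : Int) :
    Option Int × Option Int × Option Int × Option Int :=
  let mat := matrix.map (fun row => row.map (fun v => if v < h_ then (0 : Int) else 1))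
  let m := mat.length
  let n := (mat.headD []).length
  let k_list := klistA mat m n
  let pref := prefA mat n m
  let dp := dpA pref m n k k_list
  let fin := finA dp m n
  if fin.1 + fin.2.2 - 1 ≥ fin.1 ∨ fin.2.1 + fin.2.2 - 1 ≥ fin.2.1 then
    (some fin.1, some fin.2.1, some (fin.1 + fin.2.2 - 1), some (fin.2.1 + fin.2.2 - 1))
  else (none, none, none, none)

-- ===== PORT B =====
-- binary search on the side length ('while lo < hi' ported with fuel = the initial gap)
def bsB (P : List (List Int)) (kk : Int) (i j : Nat) : Nat → Int → Int → Int
  | 0, lo, _ => lo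
  | fuel + 1, lo, hi =>
    if lo < hi then
      let mid := PySem.Int.floordiv (lo + hi + 1) 2
      if (P.getD ((i : Int) + mid).toNat []).getD (((j : Int) + mid).toNat) 0
           - (P.getD i []).getD (((j : Int) + mid).toNat) 0
           - (P.getD ((i : Int) + mid).toNat []).getD j 0
           + (P.getD i []).getD j 0 ≤ kk
      then bsB P kk i j fuel mid hi
      else bsB P kk i j fuel lo (mid - 1)
    else lo

def sideB (P : List (List Int)) (kk : Int) (m n i j : Nat) : Int :=
  bsB P kk i j (min ((m : Int) - i) ((n : Int) - j)).toNat 0 (min ((m : Int) - i) ((n : Int) - j))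

def rowScanB (h_ : Int) (l : List Int) : Int × List Int :=
  l.foldl (fun (st : Int × List Int) v =>
    let acc := st.1 + (if v < h_ then 1 else 0); (acc, st.2 ++ [acc])) (0, [0])

def prefB (matrix : List (List Int)) (h_ : Int) (n : Nat) : List (List Int) :=
  matrix.foldl (fun P row =>
      P ++ [List.zipWith (· + ·) (P.getLastD []) (rowScanB h_ (row.take n)).2])
    [List.replicate (n+1) 0]

def gridB (P : List (List Int)) (kk : Int) (m n : Nat) : List (List Int) :=
  (List.range m).map (fun i => (List.range n).map (fun j => sideB P kk m n i j))

def maxB (S : List (List Int)) : Int :=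
  S.foldl (fun a row => row.foldl (fun a v => if v > a then v else a) a) 0

def alg7b_alt (matrix : List (List Int)) (h_ : Int) (k : Int) :
    Option Int × Option Int × Option Int × Option Int :=
  let m := matrix.length
  let n := (matrix.headD []).length
  let kk := if k > 0 then k else 0
  let P := prefB matrix h_ n
  let S := gridB P kk m n
  let M := maxB S
  if M = 0 then (none, none, none, none)
  else
    match ((List.range m).reverse.flatMap (fun i => (List.range n).reverse.map (fun j => (i, j)))).find?
        (fun c => (S.getD c.1 []).getD c.2 0 == M) with
    | some c => (some ((c.1 : Int) + 1), some ((c.2 : Int) + 1),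
                 some ((c.1 : Int) + M), some ((c.2 : Int) + M))
    | none => (none, none, none, none)  -- unreachable: a positive maximum is attained in S

-- ===== PRECONDITION & SPEC =====
-- Pre_ excludes exactly the inputs on which A raises: the empty matrix (matrix[0] is an
-- IndexError) and matrices whose later rows are shorter than row 0 (row indexing raises).
def Pre_alg7b (matrix : List (List Int)) (h_ : Int) (k : Int) : Prop :=
  matrix ≠ [] ∧ ∀ row ∈ matrix, (matrix.headD []).length ≤ row.length
instance (matrix : List (List Int)) (h_ : Int) (k : Int) : Decidable (Pre_alg7b matrix h_ k) := by
  unfold Pre_alg7b; infer_instance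

def pvWitness_alg7b : List (List Int) × Int × Int := ([[1, 0], [0, 2]], 1, 1)

def Spec_alg7b (matrix : List (List Int)) (h_ : Int) (k : Int)
    (out : Option Int × Option Int × Option Int × Option Int) : Prop := out = alg7b_alt matrix h_ k
instance (matrix : List (List Int)) (h_ : Int) (k : Int)
    (out : Option Int × Option Int × Option Int × Option Int) : Decidable (Spec_alg7b matrix h_ k out) := by
  unfold Spec_alg7b; infer_instance

-- ===== CLAIM (what is proved, stated in full; the proofs are below) =====
def Claim_equal_alg7b : Prop := ∀ (matrix : List (List Int)) (h_ : Int) (k : Int),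
  Dom_alg7b matrix h_ k → Pre_alg7b matrix h_ k → Spec_alg7b matrix h_ k (alg7b matrix h_ k)

-- ===== LEMMAS AND PROOFS =====

-- proof-side counting machinery
def valM (matrix : List (List Int)) (r c : Nat) : Int := (matrix.getD r []).getD c 0

def zind (matrix : List (List Int)) (h_ : Int) (r c : Nat) : Int :=
  if valM matrix r c < h_ then 1 else 0

def vind (matrix : List (List Int)) (h_ : Int) (r c : Nat) : Int :=
  if valM matrix r c < h_ then 0 else 1

def zcnt (matrix : List (List Int)) (h_ : Int) (i j : Nat) : Int :=
  ∑ p ∈ Finset.range i ×ˢ Finset.range j, zind matrix h_ p.1 p.2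

def ocnt (matrix : List (List Int)) (h_ : Int) (i j : Nat) : Int :=
  ∑ p ∈ Finset.range i ×ˢ Finset.range j, vind matrix h_ p.1 p.2

def sqF (i j s : Nat) : Finset (Nat × Nat) := Finset.Ico i (i+s) ×ˢ Finset.Ico j (j+s)

def Zc (matrix : List (List Int)) (h_ : Int) (i j s : Nat) : Int :=
  ∑ p ∈ sqF i j s, zind matrix h_ p.1 p.2

-- the common value: largest side s ≤ min(m-i, n-j) whose square has at most max(k,0) zeros
def gN (matrix : List (List Int)) (h_ k : Int) (i j : Nat) : Nat :=
  Nat.findGreatest (fun s => Zc matrix h_ i j s ≤ (if k > 0 then k else 0))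
    (min (matrix.length - i) ((matrix.headD []).length - j))

theorem zind_nonneg (matrix : List (List Int)) (h_ : Int) (r c : Nat) :
    0 ≤ zind matrix h_ r c := by
  unfold zind; split <;> norm_num

theorem zind_le_one (matrix : List (List Int)) (h_ : Int) (r c : Nat) :
    zind matrix h_ r c ≤ 1 := by
  unfold zind; split <;> norm_num

theorem vind_add_zind (matrix : List (List Int)) (h_ : Int) (r c : Nat) :
    vind matrix h_ r c + zind matrix h_ r c = 1 := by
  unfold vind zind; split <;> norm_num

theorem ocnt_add_zcnt (matrix : List (List Int)) (h_ : Int) (i j : Nat) :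
    ocnt matrix h_ i j + zcnt matrix h_ i j = (i : Int) * (j : Int) := by
  unfold ocnt zcnt
  rw [← Finset.sum_add_distrib]
  have : ∀ p ∈ Finset.range i ×ˢ Finset.range j,
      vind matrix h_ p.1 p.2 + zind matrix h_ p.1 p.2 = 1 :=
    fun p _ => vind_add_zind matrix h_ p.1 p.2
  rw [Finset.sum_congr rfl this, Finset.sum_const, Finset.card_product, Finset.card_range,
    Finset.card_range, nsmul_eq_mul]
  push_cast; ring

theorem Zc_zero (matrix : List (List Int)) (h_ : Int) (i j : Nat) : Zc matrix h_ i j 0 = 0 := by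
  unfold Zc sqF
  simp

theorem sqF_subset (i j : Nat) {s t : Nat} (hst : s ≤ t) : sqF i j s ⊆ sqF i j t := by
  unfold sqF
  exact Finset.product_subset_product (Finset.Ico_subset_Ico le_rfl (by omega))
    (Finset.Ico_subset_Ico le_rfl (by omega))

theorem Zc_mono (matrix : List (List Int)) (h_ : Int) (i j : Nat) {s t : Nat} (hst : s ≤ t) :
    Zc matrix h_ i j s ≤ Zc matrix h_ i j t :=
  Finset.sum_le_sum_of_subset_of_nonneg (sqF_subset i j hst)
    (fun p _ _ => zind_nonneg matrix h_ p.1 p.2)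

theorem Zc_le_sq (matrix : List (List Int)) (h_ : Int) (i j s : Nat) :
    Zc matrix h_ i j s ≤ (s : Int) * (s : Int) := by
  unfold Zc
  calc ∑ p ∈ sqF i j s, zind matrix h_ p.1 p.2
      ≤ ∑ _p ∈ sqF i j s, (1 : Int) :=
        Finset.sum_le_sum fun p _ => zind_le_one matrix h_ p.1 p.2
    _ = ((sqF i j s).card : Int) := by rw [Finset.sum_const, nsmul_eq_mul, mul_one]
    _ = (s : Int) * (s : Int) := by
        unfold sqF
        rw [Finset.card_product, Nat.card_Ico, Nat.add_sub_cancel_left, Nat.card_Ico,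
          Nat.add_sub_cancel_left]
        push_cast
        ring

theorem Zc_succ_sub (matrix : List (List Int)) (h_ : Int) (i j t : Nat) :
    Zc matrix h_ i j (t+1) - Zc matrix h_ i j t =
      ∑ p ∈ sqF i j (t+1) \ sqF i j t, zind matrix h_ p.1 p.2 := by
  unfold Zc
  rw [Finset.sum_sdiff_eq_sub (sqF_subset i j (by omega : t ≤ t + 1))]

theorem mem_sqF {i j s r c : Nat} :
    (r, c) ∈ sqF i j s ↔ (i ≤ r ∧ r < i + s ∧ j ≤ c ∧ c < j + s) := by
  unfold sqF
  simp [Finset.mem_product, Finset.mem_Ico]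
  tauto

theorem exists_boundary (matrix : List (List Int)) (h_ : Int) (i j t : Nat)
    (hlt : Zc matrix h_ i j t < Zc matrix h_ i j (t+1)) :
    ∃ r c : Nat, zind matrix h_ r c = 1 ∧ i ≤ r ∧ j ≤ c ∧ r ≤ i + t ∧ c ≤ j + t ∧
      (r = i + t ∨ c = j + t) := by
  have hpos : 0 < ∑ p ∈ sqF i j (t+1) \ sqF i j t, zind matrix h_ p.1 p.2 := by
    have := Zc_succ_sub matrix h_ i j t
    omega
  obtain ⟨p, hp, hne⟩ := Finset.exists_ne_zero_of_sum_ne_zero hpos.ne'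
  obtain ⟨r, c⟩ := p
  rw [Finset.mem_sdiff] at hp
  have h1 := hp.1
  have h2 := hp.2
  rw [mem_sqF] at h1
  rw [mem_sqF] at h2
  have hne' : zind matrix h_ r c ≠ 0 := hne
  refine ⟨r, c, ?_, by omega, by omega, by omega, by omega, by omega⟩
  have := zind_nonneg matrix h_ r c
  have := zind_le_one matrix h_ r c
  omega

theorem one_le_Zc (matrix : List (List Int)) (h_ : Int) (i j s r c : Nat)
    (hz : zind matrix h_ r c = 1) (h1 : i ≤ r) (h2 : r < i + s) (h3 : j ≤ c) (h4 : c < j + s) :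
    1 ≤ Zc matrix h_ i j s := by
  have hmem : (r, c) ∈ sqF i j s := mem_sqF.mpr ⟨h1, h2, h3, h4⟩
  have hle := Finset.single_le_sum (f := fun p : Nat × Nat => zind matrix h_ p.1 p.2)
    (fun p _ => zind_nonneg matrix h_ p.1 p.2) hmem
  have hle' : zind matrix h_ r c ≤ Zc matrix h_ i j s := hle
  omega

theorem Zc_succ_ge (matrix : List (List Int)) (h_ : Int) (i j t r c : Nat)
    (hz : zind matrix h_ r c = 1) (h1 : i ≤ r) (h3 : j ≤ c) (h2 : r ≤ i + t) (h4 : c ≤ j + t)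
    (hb : r = i + t ∨ c = j + t) :
    Zc matrix h_ i j t + 1 ≤ Zc matrix h_ i j (t+1) := by
  have hmem : (r, c) ∈ sqF i j (t+1) \ sqF i j t := by
    rw [Finset.mem_sdiff, mem_sqF, mem_sqF]
    omega
  have hle := Finset.single_le_sum (f := fun p : Nat × Nat => zind matrix h_ p.1 p.2)
    (fun p _ => zind_nonneg matrix h_ p.1 p.2) hmem
  have hle' : zind matrix h_ r c ≤ ∑ p ∈ sqF i j (t+1) \ sqF i j t, zind matrix h_ p.1 p.2 := hle
  have := Zc_succ_sub matrix h_ i j t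
  omega

theorem sum_range_split (a b : Nat) (f : Nat → Int) :
    ∑ x ∈ Finset.range (a+b), f x
      = ∑ x ∈ Finset.range a, f x + ∑ x ∈ Finset.Ico a (a+b), f x := by
  simp only [Finset.range_eq_Ico]
  rw [← Finset.sum_Ico_consecutive f (Nat.zero_le a) (by omega : a ≤ a + b)]

theorem prefix_bridge (matrix : List (List Int)) (h_ : Int) (i j s : Nat) :
    zcnt matrix h_ (i+s) (j+s) - zcnt matrix h_ i (j+s) - zcnt matrix h_ (i+s) j
      + zcnt matrix h_ i j = Zc matrix h_ i j s := by
  have A1 : zcnt matrix h_ (i+s) (j+s) = zcnt matrix h_ i (j+s)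
      + ∑ r ∈ Finset.Ico i (i+s), ∑ c ∈ Finset.range (j+s), zind matrix h_ r c := by
    unfold zcnt
    rw [Finset.sum_product, Finset.sum_product]
    exact sum_range_split i s (fun r => ∑ c ∈ Finset.range (j+s), zind matrix h_ r c)
  have A2 : zcnt matrix h_ (i+s) j = zcnt matrix h_ i j
      + ∑ r ∈ Finset.Ico i (i+s), ∑ c ∈ Finset.range j, zind matrix h_ r c := by
    unfold zcnt
    rw [Finset.sum_product, Finset.sum_product]
    exact sum_range_split i s (fun r => ∑ c ∈ Finset.range j, zind matrix h_ r c)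
  have B1 : Zc matrix h_ i j s
      = ∑ r ∈ Finset.Ico i (i+s), ∑ c ∈ Finset.Ico j (j+s), zind matrix h_ r c := by
    unfold Zc sqF
    rw [Finset.sum_product]
  have A3 : ∀ r : Nat, ∑ c ∈ Finset.Ico j (j+s), zind matrix h_ r c
      = ∑ c ∈ Finset.range (j+s), zind matrix h_ r c - ∑ c ∈ Finset.range j, zind matrix h_ r c := by
    intro r
    rw [sum_range_split j s (fun c => zind matrix h_ r c)]
    ring
  rw [A1, A2, B1, Finset.sum_congr rfl (fun r _ => A3 r), Finset.sum_sub_distrib]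
  ring

-- ---------- generic list-access helpers ----------
theorem getD_concat_len {α : Type} (l : List α) (x d : α) : (l ++ [x]).getD l.length d = x := by
  rw [List.getD_eq_getElem?_getD, List.getElem?_append_right (Nat.le_refl _)]
  simp

-- ---------- matrix-entry bridges ----------
theorem bin_getD_row (matrix : List (List Int)) (h_ : Int) (r : Nat) :
    (matrix.map (fun row => row.map (fun v => if v < h_ then (0 : Int) else 1))).getD r []
      = (matrix.getD r []).map (fun v => if v < h_ then (0 : Int) else 1) := by
  rcases h : matrix[r]? with _ | row
  · rw [List.getD_eq_getElem?_getD, List.getElem?_map, h,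
      List.getD_eq_getElem?_getD, h]
    rfl
  · rw [List.getD_eq_getElem?_getD, List.getElem?_map, h,
      List.getD_eq_getElem?_getD, h]
    rfl

theorem binRow_getD (matrix : List (List Int)) (h_ : Int) (r c : Nat)
    (hc : c < (matrix.getD r []).length) :
    ((matrix.map (fun row => row.map (fun v => if v < h_ then (0 : Int) else 1))).getD r []).getD c 0
      = vind matrix h_ r c := by
  rw [bin_getD_row]
  unfold vind valM
  rw [List.getD_eq_getElem _ _ (by simpa using hc), List.getD_eq_getElem _ _ hc, List.getElem_map]

-- ---------- counting recurrences ----------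
theorem zcnt_zero_left (matrix : List (List Int)) (h_ : Int) (j : Nat) :
    zcnt matrix h_ 0 j = 0 := by unfold zcnt; simp

theorem ocnt_zero_left (matrix : List (List Int)) (h_ : Int) (j : Nat) :
    ocnt matrix h_ 0 j = 0 := by unfold ocnt; simp

theorem ocnt_zero_right (matrix : List (List Int)) (h_ : Int) (i : Nat) :
    ocnt matrix h_ i 0 = 0 := by unfold ocnt; simp

theorem zcnt_row (matrix : List (List Int)) (h_ : Int) (i j : Nat) :
    zcnt matrix h_ (i+1) j = zcnt matrix h_ i j + ∑ c ∈ Finset.range j, zind matrix h_ i c := by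
  unfold zcnt
  rw [Finset.sum_product, Finset.sum_product, Finset.sum_range_succ]

theorem ocnt_row (matrix : List (List Int)) (h_ : Int) (i j : Nat) :
    ocnt matrix h_ (i+1) j = ocnt matrix h_ i j + ∑ c ∈ Finset.range j, vind matrix h_ i c := by
  unfold ocnt
  rw [Finset.sum_product, Finset.sum_product, Finset.sum_range_succ]

theorem ocnt_rec (matrix : List (List Int)) (h_ : Int) (i j : Nat) :
    ocnt matrix h_ (i+1) (j+1)
      = ocnt matrix h_ i (j+1) + ocnt matrix h_ (i+1) j - ocnt matrix h_ i j
        + vind matrix h_ i j := by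
  rw [ocnt_row matrix h_ i (j+1), ocnt_row matrix h_ i j, Finset.sum_range_succ]
  ring

-- ---------- A-side prefix table ----------
theorem prefRowA_succ (prev br : List Int) (n : Nat) :
    prefRowA prev br (n+1) = prefRowA prev br n
      ++ [prev.getD (n+1) 0 + (prefRowA prev br n).getD n 0 - prev.getD n 0 + br.getD n 0] := by
  unfold prefRowA
  rw [List.range_succ, List.foldl_append]
  rfl

theorem prefRowA_len (prev br : List Int) (n : Nat) : (prefRowA prev br n).length = n + 1 := by
  induction n with
  | zero => rfl
  | succ n ih => rw [prefRowA_succ, List.length_append, ih]; rfl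

theorem prefRowA_entry (matrix : List (List Int)) (h_ : Int) (i N : Nat) (prev br : List Int)
    (hprev : ∀ j, j ≤ N → prev.getD j 0 = ocnt matrix h_ i j)
    (hbr : ∀ j, j < N → br.getD j 0 = vind matrix h_ i j) :
    ∀ n, n ≤ N → ∀ j, j ≤ n → (prefRowA prev br n).getD j 0 = ocnt matrix h_ (i+1) j := by
  intro n
  induction n with
  | zero =>
    intro _ j hj
    interval_cases j
    show (0 : Int) = _
    rw [ocnt_zero_right]
  | succ n ih =>
    intro hn j hj
    rcases Nat.lt_or_ge j (n+1) with hlt | hge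
    · rw [prefRowA_succ, List.getD_append (h := by rw [prefRowA_len]; omega)]
      exact ih (by omega) j (by omega)
    · have hj' : j = n + 1 := by omega
      subst hj'
      have hlen : (prefRowA prev br n).length = n + 1 := prefRowA_len prev br n
      rw [prefRowA_succ]
      have h2 := getD_concat_len (prefRowA prev br n)
        (prev.getD (n+1) 0 + (prefRowA prev br n).getD n 0 - prev.getD n 0 + br.getD n 0) 0
      rw [hlen] at h2
      rw [h2, hprev (n+1) (by omega), hprev n (by omega), ih (by omega) n (by omega),
        ocnt_rec, hbr n (by omega)]

theorem prefA_succ (bin : List (List Int)) (n m : Nat) :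
    prefA bin n (m+1) = prefA bin n m
      ++ [prefRowA ((prefA bin n m).getD m []) (bin.getD m []) n] := by
  unfold prefA
  rw [List.range_succ, List.foldl_append]
  rfl

theorem prefA_len (bin : List (List Int)) (n m : Nat) : (prefA bin n m).length = m + 1 := by
  induction m with
  | zero => rfl
  | succ m ih => rw [prefA_succ, List.length_append, ih]; rfl

theorem prefA_entry (matrix : List (List Int)) (h_ : Int) (n : Nat) :
    ∀ m, m ≤ matrix.length → (∀ r, r < m → n ≤ (matrix.getD r []).length) →
    ∀ i, i ≤ m → ∀ j, j ≤ n →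
    ((prefA (matrix.map (fun row => row.map (fun v => if v < h_ then (0 : Int) else 1))) n m).getD i []).getD j 0
      = ocnt matrix h_ i j := by
  intro m
  induction m with
  | zero =>
    intro _ _ i hi j hj
    interval_cases i
    show (List.replicate (n+1) (0 : Int)).getD j 0 = _
    rw [ocnt_zero_left]
    rcases Nat.lt_or_ge j (n+1) with hlt | hge
    · rw [List.getD_eq_getElem _ _ (by simpa using hlt), List.getElem_replicate]
    · rw [List.getD_eq_default _ _ (by simpa using hge)]
  | succ m ih =>
    intro hm hrows i hi j hj
    rcases Nat.lt_or_ge i (m+1) with hlt | hge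
    · rw [prefA_succ, List.getD_append (h := by rw [prefA_len]; omega)]
      exact ih (by omega) (fun r hr => hrows r (by omega)) i (by omega) j hj
    · have hi' : i = m + 1 := by omega
      subst hi'
      have hlen := prefA_len (matrix.map (fun row => row.map (fun v => if v < h_ then (0 : Int) else 1))) n m
      rw [prefA_succ]
      have hrow : (prefA (matrix.map (fun row => row.map (fun v => if v < h_ then (0 : Int) else 1))) n m
          ++ [prefRowA ((prefA (matrix.map (fun row => row.map (fun v => if v < h_ then (0 : Int) else 1))) n m).getD m [])
               ((matrix.map (fun row => row.map (fun v => if v < h_ then (0 : Int) else 1))).getD m []) n]).getD (m+1) []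
          = prefRowA ((prefA (matrix.map (fun row => row.map (fun v => if v < h_ then (0 : Int) else 1))) n m).getD m [])
               ((matrix.map (fun row => row.map (fun v => if v < h_ then (0 : Int) else 1))).getD m []) n := by
        conv_lhs => rw [show m + 1 = (prefA (matrix.map (fun row => row.map (fun v => if v < h_ then (0 : Int) else 1))) n m).length from hlen.symm]
        exact getD_concat_len _ _ _
      rw [hrow]
      exact prefRowA_entry matrix h_ m n _ _
        (fun j' hj' => ih (by omega) (fun r hr => hrows r (by omega)) m (by omega) j' hj')
        (fun j' hj' => binRow_getD matrix h_ m j' (by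
          have := hrows m (by omega); omega))
        n (le_rfl) j hj

theorem pre_rows (matrix : List (List Int)) (h_ k : Int) (hpre : Pre_alg7b matrix h_ k) :
    ∀ r, r < matrix.length → (matrix.headD []).length ≤ (matrix.getD r []).length := by
  intro r hr
  have hm : matrix.getD r [] ∈ matrix := by
    rw [List.getD_eq_getElem _ _ hr]
    exact List.getElem_mem hr
  exact hpre.2 _ hm

theorem vind_zero_iff (matrix : List (List Int)) (h_ : Int) (r c : Nat) :
    vind matrix h_ r c = 0 ↔ zind matrix h_ r c = 1 := by
  unfold vind zind
  split <;> simp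

-- ---------- k_list and transformList membership ----------
theorem klistA_mem (matrix : List (List Int)) (h_ k : Int) (hpre : Pre_alg7b matrix h_ k)
    (z : Int × Int) :
    z ∈ klistA (matrix.map (fun row => row.map (fun v => if v < h_ then (0 : Int) else 1)))
          matrix.length (matrix.headD []).length
      ↔ ∃ r c : Nat, r < matrix.length ∧ c < (matrix.headD []).length ∧
          zind matrix h_ r c = 1 ∧ z = ((r : Int), (c : Int)) := by
  unfold klistA
  have hinner : ∀ (acc : List (Int × Int)) (i : Nat), i ∈ List.range matrix.length →
      (List.range (matrix.headD []).length).foldl (fun acc j =>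
        if ((matrix.map (fun row => row.map (fun v => if v < h_ then (0 : Int) else 1))).getD i []).getD j 0 == 0
        then acc ++ [((i : Int), (j : Int))] else acc) acc
      = acc ++ ((List.range (matrix.headD []).length).filter (fun j =>
          ((matrix.map (fun row => row.map (fun v => if v < h_ then (0 : Int) else 1))).getD i []).getD j 0 == 0)).map
            (fun j : Nat => ((i : Int), (j : Int))) := by
    intro acc i _
    exact PySem.List.foldl_append_if _ _ _ _
  rw [PySem.List.foldl_congr_mem _ _ _ _ hinner, PySem.List.foldl_append_eq_flatMap, List.nil_append]
  simp only [List.mem_flatMap, List.mem_map, List.mem_filter, List.mem_range]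
  constructor
  · rintro ⟨r, hr, c, ⟨hc, hz0⟩, rfl⟩
    refine ⟨r, c, hr, hc, ?_, rfl⟩
    rw [binRow_getD matrix h_ r c (by have := pre_rows matrix h_ k hpre r hr; omega)] at hz0
    rw [← vind_zero_iff]
    simpa using hz0
  · rintro ⟨r, c, hr, hc, hz1, rfl⟩
    refine ⟨r, hr, c, ⟨hc, ?_⟩, rfl⟩
    rw [binRow_getD matrix h_ r c (by have := pre_rows matrix h_ k hpre r hr; omega)]
    simp [vind_zero_iff, hz1]

def ElemT (matrix : List (List Int)) (h_ : Int) (i j : Nat) (e : Int × Int) : Prop :=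
  ∃ r c : Nat, r < matrix.length ∧ c < (matrix.headD []).length ∧ zind matrix h_ r c = 1 ∧
    i ≤ r ∧ j ≤ c ∧ e = ((r : Int) - (i : Int), (c : Int) - (j : Int))

theorem transformList_mem (matrix : List (List Int)) (h_ k : Int) (hpre : Pre_alg7b matrix h_ k)
    (i j : Nat) (e : Int × Int) :
    e ∈ transformList (i : Int) (j : Int)
        (klistA (matrix.map (fun row => row.map (fun v => if v < h_ then (0 : Int) else 1)))
          matrix.length (matrix.headD []).length)
      ↔ ElemT matrix h_ i j e := by
  unfold transformList ElemT
  simp only [List.mem_map, List.mem_filter]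
  constructor
  · rintro ⟨z, ⟨hzmem, hcond⟩, rfl⟩
    obtain ⟨r, c, hr, hc, hz1, rfl⟩ := (klistA_mem matrix h_ k hpre z).mp hzmem
    simp only [Bool.and_eq_true, decide_eq_true_eq] at hcond
    exact ⟨r, c, hr, hc, hz1, by omega, by omega, rfl⟩
  · rintro ⟨r, c, hr, hc, hz1, hir, hjc, rfl⟩
    refine ⟨((r : Int), (c : Int)), ⟨(klistA_mem matrix h_ k hpre _).mpr ⟨r, c, hr, hc, hz1, rfl⟩, ?_⟩, rfl⟩
    simp only [Bool.and_eq_true, decide_eq_true_eq]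
    constructor <;> [skip; skip] <;> omega

-- ---------- A-side prefix-sum expression bridge ----------
theorem zexprA (matrix : List (List Int)) (h_ k : Int) (hpre : Pre_alg7b matrix h_ k)
    (i j : Nat) (s : Int) (hs : 1 ≤ s)
    (him : (i : Int) + s ≤ (matrix.length : Int))
    (hjn : (j : Int) + s ≤ ((matrix.headD []).length : Int)) :
    s * s -
      (((prefA (matrix.map (fun row => row.map (fun v => if v < h_ then (0 : Int) else 1)))
          (matrix.headD []).length matrix.length).getD ((i : Int) + s).toNat []).getD (((j : Int) + s).toNat) 0
       - ((prefA (matrix.map (fun row => row.map (fun v => if v < h_ then (0 : Int) else 1)))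
          (matrix.headD []).length matrix.length).getD i []).getD (((j : Int) + s).toNat) 0
       - ((prefA (matrix.map (fun row => row.map (fun v => if v < h_ then (0 : Int) else 1)))
          (matrix.headD []).length matrix.length).getD ((i : Int) + s).toNat []).getD j 0
       + ((prefA (matrix.map (fun row => row.map (fun v => if v < h_ then (0 : Int) else 1)))
          (matrix.headD []).length matrix.length).getD i []).getD j 0)
      = Zc matrix h_ i j s.toNat := by
  have hS : s = ((s.toNat : Nat) : Int) := by omega
  have hidx1 : ((i : Int) + s).toNat = i + s.toNat := by omega
  have hidx2 : ((j : Int) + s).toNat = j + s.toNat := by omega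
  have hent := prefA_entry matrix h_ (matrix.headD []).length matrix.length le_rfl
    (fun r hr => pre_rows matrix h_ k hpre r hr)
  rw [hidx1, hidx2]
  rw [hent (i + s.toNat) (by omega) (j + s.toNat) (by omega),
    hent i (by omega) (j + s.toNat) (by omega),
    hent (i + s.toNat) (by omega) j (by omega),
    hent i (by omega) j (by omega)]
  have e1 := ocnt_add_zcnt matrix h_ (i + s.toNat) (j + s.toNat)
  have e2 := ocnt_add_zcnt matrix h_ i (j + s.toNat)
  have e3 := ocnt_add_zcnt matrix h_ (i + s.toNat) j
  have e4 := ocnt_add_zcnt matrix h_ i j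
  have e5 := prefix_bridge matrix h_ i j s.toNat
  push_cast at e1 e2 e3 e4 ⊢
  linear_combination e2 + e3 + e5 - e1 - e4 + (s + (s.toNat : Int)) * hS

-- ---------- candidate sizes and the inner loop of A ----------
def szE (e : Int × Int) : Nat := (max e.1 e.2 + 1).toNat

def CandP (matrix : List (List Int)) (h_ : Int) (i j s : Nat) : Prop :=
  ∃ r c : Nat, r < matrix.length ∧ c < (matrix.headD []).length ∧ zind matrix h_ r c = 1 ∧
    i ≤ r ∧ j ≤ c ∧ max (r - i) (c - j) + 1 = s

def TrigP (matrix : List (List Int)) (h_ k : Int) (i j s : Nat) : Prop :=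
  i + s ≤ matrix.length ∧ j + s ≤ (matrix.headD []).length ∧ Zc matrix h_ i j s > k

def InvSt (matrix : List (List Int)) (h_ k : Int) (i j : Nat) (st : Bool × Int × Int) : Prop :=
  st = (false, 0, (matrix.length : Int) * ((matrix.headD []).length : Int) + 1) ∨
  ∃ s : Nat, st = (true, (s : Int), Zc matrix h_ i j s) ∧ TrigP matrix h_ k i j s ∧
    CandP matrix h_ i j s

theorem szE_elem (matrix : List (List Int)) (h_ : Int) (i j : Nat) (e : Int × Int)
    (he : ElemT matrix h_ i j e) : CandP matrix h_ i j (szE e) := by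
  obtain ⟨r, c, hr, hc, hz, hir, hjc, rfl⟩ := he
  exact ⟨r, c, hr, hc, hz, hir, hjc, by unfold szE; simp; omega⟩

theorem cand_pos (matrix : List (List Int)) (h_ : Int) (i j s : Nat)
    (hc : CandP matrix h_ i j s) : 1 ≤ s := by
  obtain ⟨r, c, _, _, _, _, _, h⟩ := hc
  omega

theorem cand_one_le (matrix : List (List Int)) (h_ : Int) (i j s : Nat)
    (hc : CandP matrix h_ i j s) : 1 ≤ Zc matrix h_ i j s := by
  obtain ⟨r, c, _, _, hz, hir, hjc, h⟩ := hc
  exact one_le_Zc matrix h_ i j s r c hz hir (by omega) hjc (by omega)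

theorem cand_strict (matrix : List (List Int)) (h_ : Int) (i j s : Nat)
    (hc : CandP matrix h_ i j s) :
    Zc matrix h_ i j (s - 1) + 1 ≤ Zc matrix h_ i j s := by
  obtain ⟨r, c, _, _, hz, hir, hjc, h⟩ := hc
  have h1 : s - 1 + 1 = s := by omega
  have := Zc_succ_ge matrix h_ i j (s - 1) r c hz hir hjc (by omega) (by omega) (by omega)
  rw [h1] at this
  exact this

theorem cand_lt (matrix : List (List Int)) (h_ : Int) (i j s t : Nat)
    (hc : CandP matrix h_ i j t) (hst : s < t) :
    Zc matrix h_ i j s < Zc matrix h_ i j t := by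
  have h1 := cand_strict matrix h_ i j t hc
  have h2 := Zc_mono matrix h_ i j (show s ≤ t - 1 by omega)
  omega

theorem stepA_char (matrix : List (List Int)) (h_ k : Int) (hpre : Pre_alg7b matrix h_ k)
    (i j : Nat) (st : Bool × Int × Int) (e : Int × Int) (he : ElemT matrix h_ i j e) :
    stepA (prefA (matrix.map (fun row => row.map (fun v => if v < h_ then (0 : Int) else 1)))
        (matrix.headD []).length matrix.length) matrix.length (matrix.headD []).length k i j st e
      = if i + szE e ≤ matrix.length ∧ j + szE e ≤ (matrix.headD []).length then
          (if Zc matrix h_ i j (szE e) > k ∧ Zc matrix h_ i j (szE e) < st.2.2 then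
            (true, ((szE e : Nat) : Int), Zc matrix h_ i j (szE e)) else st)
        else st := by
  obtain ⟨r, c, hr, hc, hz1, hir, hjc, hee⟩ := he
  have h1 : (0 : Int) ≤ e.1 := by rw [hee]; simp; omega
  have h2 : (0 : Int) ≤ e.2 := by rw [hee]; simp; omega
  have hsz : max e.1 e.2 + 1 = ((szE e : Nat) : Int) := by unfold szE; omega
  simp only [stepA]
  by_cases hfit : i + szE e ≤ matrix.length ∧ j + szE e ≤ (matrix.headD []).length
  · rw [if_pos (by constructor <;> [skip; skip] <;> (rw [hsz]; omega)), if_pos hfit]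
    have hz := zexprA matrix h_ k hpre i j ((szE e : Nat) : Int) (by unfold szE; omega)
      (by omega) (by omega)
    rw [Int.toNat_natCast] at hz
    rw [hsz, hz]
  · rw [if_neg ?_, if_neg hfit]
    intro hcon
    rw [hsz] at hcon
    omega

theorem trig_zc_small (matrix : List (List Int)) (h_ k : Int) (i j s : Nat)
    (ht : i + s ≤ matrix.length ∧ j + s ≤ (matrix.headD []).length) :
    Zc matrix h_ i j s < (matrix.length : Int) * ((matrix.headD []).length : Int) + 1 := by
  have h1 := Zc_le_sq matrix h_ i j s
  have b1 : (s : Int) ≤ (matrix.length : Int) := by exact_mod_cast (show s ≤ matrix.length by omega)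
  have b2 : (s : Int) ≤ ((matrix.headD []).length : Int) := by
    exact_mod_cast (show s ≤ (matrix.headD []).length by omega)
  have h2 : ((s : Int)) * ((s : Int)) ≤ (matrix.length : Int) * ((matrix.headD []).length : Int) :=
    mul_le_mul b1 b2 (by positivity) (by positivity)
  omega

theorem foldGo (matrix : List (List Int)) (h_ k : Int) (hpre : Pre_alg7b matrix h_ k)
    (i j : Nat) :
    ∀ (L : List (Int × Int)) (st : Bool × Int × Int),
      (∀ e ∈ L, ElemT matrix h_ i j e) → InvSt matrix h_ k i j st →
      InvSt matrix h_ k i j (L.foldl (stepA (prefA (matrix.map (fun row => row.map (fun v => if v < h_ then (0 : Int) else 1)))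
          (matrix.headD []).length matrix.length) matrix.length (matrix.headD []).length k i j) st) ∧
      (L.foldl (stepA (prefA (matrix.map (fun row => row.map (fun v => if v < h_ then (0 : Int) else 1)))
          (matrix.headD []).length matrix.length) matrix.length (matrix.headD []).length k i j) st).2.2 ≤ st.2.2 ∧
      (st.1 = true → (L.foldl (stepA (prefA (matrix.map (fun row => row.map (fun v => if v < h_ then (0 : Int) else 1)))
          (matrix.headD []).length matrix.length) matrix.length (matrix.headD []).length k i j) st).1 = true) ∧
      (∀ e ∈ L, TrigP matrix h_ k i j (szE e) →
        (L.foldl (stepA (prefA (matrix.map (fun row => row.map (fun v => if v < h_ then (0 : Int) else 1)))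
          (matrix.headD []).length matrix.length) matrix.length (matrix.headD []).length k i j) st).1 = true ∧
        (L.foldl (stepA (prefA (matrix.map (fun row => row.map (fun v => if v < h_ then (0 : Int) else 1)))
          (matrix.headD []).length matrix.length) matrix.length (matrix.headD []).length k i j) st).2.2 ≤ Zc matrix h_ i j (szE e)) ∧
      ((∀ e ∈ L, ¬ TrigP matrix h_ k i j (szE e)) →
        (L.foldl (stepA (prefA (matrix.map (fun row => row.map (fun v => if v < h_ then (0 : Int) else 1)))
          (matrix.headD []).length matrix.length) matrix.length (matrix.headD []).length k i j) st) = st) := by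
  intro L
  induction L with
  | nil =>
    intro st _ hinv
    exact ⟨hinv, le_rfl, fun h => h, by simp, fun _ => rfl⟩
  | cons e t ih =>
    intro st helem hinv
    have he : ElemT matrix h_ i j e := helem e List.mem_cons_self
    have hstep := stepA_char matrix h_ k hpre i j st e he
    have hzcand := szE_elem matrix h_ i j e he
    simp only [List.foldl_cons]
    rw [hstep]
    by_cases hfit : i + szE e ≤ matrix.length ∧ j + szE e ≤ (matrix.headD []).length
    · rw [if_pos hfit]
      by_cases hupd : Zc matrix h_ i j (szE e) > k ∧ Zc matrix h_ i j (szE e) < st.2.2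
      · rw [if_pos hupd]
        have htr : TrigP matrix h_ k i j (szE e) := ⟨hfit.1, hfit.2, hupd.1⟩
        obtain ⟨I1, I2, I3, I4, I5⟩ := ih (true, ((szE e : Nat) : Int), Zc matrix h_ i j (szE e))
          (fun x hx => helem x (List.mem_cons_of_mem _ hx))
          (Or.inr ⟨szE e, rfl, htr, hzcand⟩)
        refine ⟨I1, le_trans I2 (le_of_lt hupd.2), fun _ => I3 rfl, ?_, ?_⟩
        · intro x hx htx
          rcases List.mem_cons.mp hx with rfl | hx'
          · exact ⟨I3 rfl, I2⟩
          · exact I4 x hx' htx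
        · intro hall
          exact absurd htr (hall e List.mem_cons_self)
      · rw [if_neg hupd]
        obtain ⟨I1, I2, I3, I4, I5⟩ := ih st (fun x hx => helem x (List.mem_cons_of_mem _ hx)) hinv
        refine ⟨I1, I2, I3, ?_, fun hall => I5 (fun x hx => hall x (List.mem_cons_of_mem _ hx))⟩
        intro x hx htx
        rcases List.mem_cons.mp hx with rfl | hx'
        · -- the guard failed although the element triggers: the state already stores a
          -- value ≤ Zc (szE x)
          have hle : st.2.2 ≤ Zc matrix h_ i j (szE x) := by
            by_contra hcon
            exact hupd ⟨htx.2.2, by omega⟩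
          have hst1 : st.1 = true := by
            rcases hinv with rfl | ⟨s, rfl, _, _⟩
            · exact absurd (trig_zc_small matrix h_ k i j (szE x) ⟨htx.1, htx.2.1⟩)
                (by simpa using hle)
            · rfl
          exact ⟨I3 hst1, le_trans I2 hle⟩
        · exact I4 x hx' htx
    · rw [if_neg hfit]
      obtain ⟨I1, I2, I3, I4, I5⟩ := ih st (fun x hx => helem x (List.mem_cons_of_mem _ hx)) hinv
      refine ⟨I1, I2, I3, ?_, fun hall => I5 (fun x hx => hall x (List.mem_cons_of_mem _ hx))⟩
      intro x hx htx
      rcases List.mem_cons.mp hx with rfl | hx'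
      · exact absurd ⟨htx.1, htx.2.1⟩ hfit
      · exact I4 x hx' htx

theorem boundary_elem (matrix : List (List Int)) (h_ : Int) (i j s' : Nat) (h1 : 1 ≤ s')
    (him : i + s' ≤ matrix.length) (hjn : j + s' ≤ (matrix.headD []).length)
    (hlt : Zc matrix h_ i j (s' - 1) < Zc matrix h_ i j s') :
    ∃ e : Int × Int, ElemT matrix h_ i j e ∧ szE e = s' := by
  have hs : s' - 1 + 1 = s' := by omega
  obtain ⟨r, c, hz, hir, hjc, hr1, hc1, hb⟩ :=
    exists_boundary matrix h_ i j (s' - 1) (by rw [hs]; exact hlt)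
  refine ⟨((r : Int) - (i : Int), (c : Int) - (j : Int)),
    ⟨r, c, by omega, by omega, hz, hir, hjc, rfl⟩, ?_⟩
  unfold szE; simp; omega

theorem least_exceed (matrix : List (List Int)) (h_ k : Int) (i j S : Nat)
    (himS : i + S ≤ matrix.length) (hjnS : j + S ≤ (matrix.headD []).length)
    (hbig : (if k > 0 then k else 0) < Zc matrix h_ i j S) :
    ∃ e : Int × Int, ElemT matrix h_ i j e ∧ szE e ≤ S ∧
      TrigP matrix h_ k i j (szE e) ∧ (if k > 0 then k else 0) < Zc matrix h_ i j (szE e) ∧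
      Zc matrix h_ i j (szE e - 1) ≤ (if k > 0 then k else 0) := by
  have hkk0 : (0 : Int) ≤ (if k > 0 then k else 0) := by split <;> omega
  have hkkk : k ≤ (if k > 0 then k else 0) := by split <;> omega
  have hex : ∃ s, (if k > 0 then k else 0) < Zc matrix h_ i j s := ⟨S, hbig⟩
  have hsp := Nat.find_spec hex
  have hle : Nat.find hex ≤ S := Nat.find_min' hex hbig
  have h1 : 1 ≤ Nat.find hex := by
    by_contra h0
    have : Nat.find hex = 0 := by omega
    rw [this, Zc_zero] at hsp
    omega
  have hprev : Zc matrix h_ i j (Nat.find hex - 1) ≤ (if k > 0 then k else 0) :=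
    not_lt.mp (Nat.find_min hex (show Nat.find hex - 1 < Nat.find hex by omega))
  obtain ⟨e, he, hsz⟩ := boundary_elem matrix h_ i j (Nat.find hex) h1
    (by omega) (by omega) (lt_of_le_of_lt hprev hsp)
  rw [← hsz] at hsp hprev hle h1
  exact ⟨e, he, hle, ⟨by omega, by omega, by omega⟩, hsp, hprev⟩

theorem dpA_entry (matrix : List (List Int)) (h_ k : Int) (hpre : Pre_alg7b matrix h_ k)
    (i j : Nat) (him : i < matrix.length) (hjn : j < (matrix.headD []).length) :
    ((dpA (prefA (matrix.map (fun row => row.map (fun v => if v < h_ then (0 : Int) else 1)))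
        (matrix.headD []).length matrix.length) matrix.length (matrix.headD []).length k
        (klistA (matrix.map (fun row => row.map (fun v => if v < h_ then (0 : Int) else 1)))
          matrix.length (matrix.headD []).length)).getD i []).getD j 0
      = ((gN matrix h_ k i j : Nat) : Int) := by
  unfold dpA
  rw [PySem.List.getD_map_range _ _ _ _ him, PySem.List.getD_map_range _ _ _ _ hjn]
  have helem : ∀ e ∈ transformList (i : Int) (j : Int)
      (klistA (matrix.map (fun row => row.map (fun v => if v < h_ then (0 : Int) else 1)))
        matrix.length (matrix.headD []).length), ElemT matrix h_ i j e :=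
    fun e hem => (transformList_mem matrix h_ k hpre i j e).mp hem
  obtain ⟨I1, I2, I3, I4, I5⟩ := foldGo matrix h_ k hpre i j
    (transformList (i : Int) (j : Int)
      (klistA (matrix.map (fun row => row.map (fun v => if v < h_ then (0 : Int) else 1)))
        matrix.length (matrix.headD []).length))
    (false, 0, (matrix.length : Int) * ((matrix.headD []).length : Int) + 1)
    helem (Or.inl rfl)
  rcases I1 with hres | ⟨s, hres, htrig, hcand⟩
  · -- no trigger: the answer is the full remaining size
    have hg : gN matrix h_ k i j = min (matrix.length - i) ((matrix.headD []).length - j) := by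
      rw [gN, Nat.findGreatest_eq_iff]
      refine ⟨le_rfl, fun _ => ?_, fun t h1 h2 => absurd h2 (by omega)⟩
      by_contra hbig
      obtain ⟨e, he, hsz, htr, _, _⟩ := least_exceed matrix h_ k i j
        (min (matrix.length - i) ((matrix.headD []).length - j)) (by omega) (by omega)
        (not_le.mp hbig)
      have := (I4 e ((transformList_mem matrix h_ k hpre i j e).mpr he) htr).1
      rw [hres] at this
      simp at this
    simp only [innerA, hres, hg]
    show min ((matrix.length : Int) - ↑i) (((matrix.headD []).length : Int) - ↑j)
      = ((min (matrix.length - i) ((matrix.headD []).length - j) : Nat) : Int)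
    omega
  · obtain ⟨ht1, ht2, ht3⟩ := htrig
    have hs1 : 1 ≤ s := cand_pos matrix h_ i j s hcand
    have hzs1 : 1 ≤ Zc matrix h_ i j s := cand_one_le matrix h_ i j s hcand
    have hskk : (if k > 0 then k else 0) < Zc matrix h_ i j s := by split <;> omega
    have hmin : ∀ t, TrigP matrix h_ k i j t → CandP matrix h_ i j t → s ≤ t := by
      intro t ht hc
      obtain ⟨r, c, hr, hc', hz, hir, hjc, hmax⟩ := hc
      have he : ElemT matrix h_ i j ((r : Int) - (i : Int), (c : Int) - (j : Int)) :=
        ⟨r, c, hr, hc', hz, hir, hjc, rfl⟩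
      have hsz : szE ((r : Int) - (i : Int), (c : Int) - (j : Int)) = t := by
        unfold szE; simp; omega
      have h4 := (I4 _ ((transformList_mem matrix h_ k hpre i j _).mpr he)
        (by rw [hsz]; exact ht)).2
      rw [hres, hsz] at h4
      by_contra hcon
      have hlt := cand_lt matrix h_ i j t s hcand (by omega)
      simp at h4
      omega
    have hg : gN matrix h_ k i j = s - 1 := by
      rw [gN, Nat.findGreatest_eq_iff]
      refine ⟨by omega, fun _ => ?_, fun t h1 h2 => ?_⟩
      · -- Zc (s-1) ≤ kk
        by_contra hbig
        obtain ⟨e, he, hsz, htr, _, _⟩ := least_exceed matrix h_ k i j (s - 1)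
          (by omega) (by omega) (not_le.mp hbig)
        have := hmin (szE e) htr (szE_elem matrix h_ i j e he)
        omega
      · have hmono := Zc_mono matrix h_ i j (show s ≤ t by omega)
        exact fun hc => absurd (le_trans hmono hc) (not_le.mpr hskk)
    simp only [innerA, hres, hg]
    show (s : Int) - 1 = ((s - 1 : Nat) : Int)
    omega

-- ---------- B-side prefix table ----------
theorem rowScanB_snoc (h_ : Int) (l : List Int) (v : Int) :
    rowScanB h_ (l ++ [v])
      = ((rowScanB h_ l).1 + (if v < h_ then 1 else 0),
         (rowScanB h_ l).2 ++ [(rowScanB h_ l).1 + (if v < h_ then 1 else 0)]) := by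
  unfold rowScanB
  rw [List.foldl_append]
  rfl

theorem take_getD (row : List Int) (n c : Nat) (hc : c < n) :
    (row.take n).getD c 0 = row.getD c 0 := by
  rcases Nat.lt_or_ge c row.length with hlt | hge
  · rw [List.getD_eq_getElem _ _ (by simp only [List.length_take]; omega),
      List.getD_eq_getElem _ _ hlt, List.getElem_take]
  · rw [List.getD_eq_default _ _ (by simp only [List.length_take]; omega),
      List.getD_eq_default _ _ hge]

theorem snoc_sum_congr (h_ : Int) (l : List Int) (v : Int) (jj : Nat) (hjj : jj ≤ l.length) :
    ∑ c ∈ Finset.range jj, (if (l ++ [v]).getD c 0 < h_ then (1 : Int) else 0)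
      = ∑ c ∈ Finset.range jj, (if l.getD c 0 < h_ then (1 : Int) else 0) := by
  refine Finset.sum_congr rfl fun c hc => ?_
  rw [List.getD_append (h := by simp only [Finset.mem_range] at hc; omega)]

theorem rowScanB_len (h_ : Int) (l : List Int) : (rowScanB h_ l).2.length = l.length + 1 := by
  induction l using List.reverseRecOn with
  | nil => rfl
  | append_singleton l v ih => rw [rowScanB_snoc]; simp [ih]

theorem rowScanB_fst (h_ : Int) (l : List Int) :
    (rowScanB h_ l).1 = ∑ c ∈ Finset.range l.length, (if l.getD c 0 < h_ then (1 : Int) else 0) := by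
  induction l using List.reverseRecOn with
  | nil => simp [rowScanB]
  | append_singleton l v ih =>
    rw [rowScanB_snoc]
    show (rowScanB h_ l).1 + _ = _
    rw [ih, List.length_append, List.length_singleton, Finset.sum_range_succ,
      snoc_sum_congr h_ l v l.length le_rfl, getD_concat_len]

theorem rowScanB_getD (h_ : Int) (l : List Int) :
    ∀ jj, jj ≤ l.length → (rowScanB h_ l).2.getD jj 0
      = ∑ c ∈ Finset.range jj, (if l.getD c 0 < h_ then (1 : Int) else 0) := by
  induction l using List.reverseRecOn with
  | nil =>
    intro jj hjj
    have hjj0 : jj = 0 := by simpa using hjj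
    subst hjj0
    simp [rowScanB]
  | append_singleton l v ih =>
    intro jj hjj
    rw [rowScanB_snoc]
    show ((rowScanB h_ l).2 ++ [_]).getD jj 0 = _
    rcases Nat.lt_or_ge jj (l.length + 1) with hlt | hge
    · rw [List.getD_append (h := by rw [rowScanB_len]; omega), ih jj (by omega),
        snoc_sum_congr h_ l v jj (by omega)]
    · have hjj' : jj = l.length + 1 := by
        simp only [List.length_append, List.length_singleton] at hjj
        omega
      subst hjj'
      have hllen := rowScanB_len h_ l
      have h2 := getD_concat_len (rowScanB h_ l).2
        ((rowScanB h_ l).1 + (if v < h_ then 1 else 0)) 0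
      rw [hllen] at h2
      rw [h2, Finset.sum_range_succ, snoc_sum_congr h_ l v l.length le_rfl,
        rowScanB_fst, getD_concat_len]

theorem prefB_go (matrix : List (List Int)) (h_ k : Int) (hpre : Pre_alg7b matrix h_ k) :
    ∀ (rows : List (List Int)) (r0 : Nat) (P0 : List (List Int)),
      matrix.drop r0 = rows →
      P0.length = r0 + 1 →
      (P0.getLastD []).length = (matrix.headD []).length + 1 →
      (∀ jj, jj ≤ (matrix.headD []).length → (P0.getLastD []).getD jj 0 = zcnt matrix h_ r0 jj) →
      (∀ ii, ii ≤ r0 → ∀ jj, jj ≤ (matrix.headD []).length →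
        (P0.getD ii []).getD jj 0 = zcnt matrix h_ ii jj) →
      ∀ ii, ii ≤ r0 + rows.length → ∀ jj, jj ≤ (matrix.headD []).length →
        ((rows.foldl (fun P row =>
            P ++ [List.zipWith (· + ·) (P.getLastD [])
              (rowScanB h_ (row.take (matrix.headD []).length)).2]) P0).getD ii []).getD jj 0
          = zcnt matrix h_ ii jj := by
  intro rows
  induction rows with
  | nil =>
    intro r0 P0 _ _ _ _ hall ii hii jj hjj
    exact hall ii (by simpa using hii) jj hjj
  | cons row rows' ih =>
    intro r0 P0 hdrop hplen hlastlen hlast hall ii hii jj hjj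
    have hr0 : r0 < matrix.length := by
      by_contra hcon
      rw [List.drop_eq_nil_of_le (by omega)] at hdrop
      exact (List.cons_ne_nil _ _) hdrop.symm
    have hrow : matrix.getD r0 [] = row := by
      have h1 : (matrix.drop r0)[0]? = matrix[r0 + 0]? := List.getElem?_drop
      rw [hdrop] at h1
      have h0 : matrix[r0]? = some row := by simpa using h1.symm
      rw [List.getD_eq_getElem?_getD, h0]
      rfl
    have hrowlen : (matrix.headD []).length ≤ row.length := by
      have := pre_rows matrix h_ k hpre r0 hr0
      rwa [hrow] at this
    have htakelen : (row.take (matrix.headD []).length).length = (matrix.headD []).length := by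
      simp only [List.length_take]
      omega
    have hrplen : (rowScanB h_ (row.take (matrix.headD []).length)).2.length
        = (matrix.headD []).length + 1 := by
      rw [rowScanB_len, htakelen]
    -- the new last row
    have hnewlen : (List.zipWith (· + ·) (P0.getLastD [])
        (rowScanB h_ (row.take (matrix.headD []).length)).2).length
        = (matrix.headD []).length + 1 := by
      rw [List.length_zipWith, hlastlen, hrplen]
      omega
    have hnewent : ∀ jj', jj' ≤ (matrix.headD []).length →
        (List.zipWith (· + ·) (P0.getLastD [])
          (rowScanB h_ (row.take (matrix.headD []).length)).2).getD jj' 0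
        = zcnt matrix h_ (r0 + 1) jj' := by
      intro jj' hjj'
      rw [List.getD_eq_getElem _ _ (by rw [hnewlen]; omega), List.getElem_zipWith]
      rw [← List.getD_eq_getElem _ 0 (by rw [hlastlen]; omega),
        ← List.getD_eq_getElem _ 0 (by rw [hrplen]; omega)]
      rw [hlast jj' hjj', rowScanB_getD h_ _ jj' (by rw [htakelen]; omega)]
      have hbr : ∑ c ∈ Finset.range jj', (if (row.take (matrix.headD []).length).getD c 0 < h_ then (1 : Int) else 0)
          = ∑ c ∈ Finset.range jj', zind matrix h_ r0 c := by
        refine Finset.sum_congr rfl fun c hc => ?_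
        rw [take_getD row _ c (by simp only [Finset.mem_range] at hc; omega)]
        unfold zind valM
        rw [hrow]
      rw [hbr, zcnt_row]
    -- step the fold
    simp only [List.foldl_cons]
    have hdrop' : matrix.drop (r0 + 1) = rows' := by
      have : matrix.drop (r0 + 1) = (matrix.drop r0).drop 1 := by
        rw [List.drop_drop]
      rw [this, hdrop]
      rfl
    have hlast' : (P0 ++ [List.zipWith (· + ·) (P0.getLastD [])
        (rowScanB h_ (row.take (matrix.headD []).length)).2]).getLastD []
        = List.zipWith (· + ·) (P0.getLastD [])
            (rowScanB h_ (row.take (matrix.headD []).length)).2 := by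
      rw [List.getLastD_concat]
    refine ih (r0 + 1) _ hdrop' (by simp [hplen]) (by rw [hlast', hnewlen])
      (by rw [hlast']; exact hnewent) ?_ ii
      (by simp only [List.length_cons] at hii; omega) jj hjj
    intro ii' hii' jj' hjj'
    rcases Nat.lt_or_ge ii' (r0 + 1) with hlt | hge
    · rw [List.getD_append (h := by omega)]
      exact hall ii' (by omega) jj' hjj'
    · have hii'' : ii' = r0 + 1 := by omega
      subst hii''
      have h2 := getD_concat_len P0 (List.zipWith (· + ·) (P0.getLastD [])
        (rowScanB h_ (row.take (matrix.headD []).length)).2) []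
      rw [hplen] at h2
      rw [h2]
      exact hnewent jj' hjj'

theorem prefB_entry (matrix : List (List Int)) (h_ k : Int) (hpre : Pre_alg7b matrix h_ k) :
    ∀ ii, ii ≤ matrix.length → ∀ jj, jj ≤ (matrix.headD []).length →
    ((prefB matrix h_ (matrix.headD []).length).getD ii []).getD jj 0 = zcnt matrix h_ ii jj := by
  intro ii hii jj hjj
  have hrep : ∀ jj', jj' ≤ (matrix.headD []).length →
      ((List.replicate ((matrix.headD []).length + 1) (0 : Int))).getD jj' 0
        = zcnt matrix h_ 0 jj' := by
    intro jj' hjj'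
    rw [zcnt_zero_left, List.getD_eq_getElem _ _ (by simp only [List.length_replicate]; omega),
      List.getElem_replicate]
  exact prefB_go matrix h_ k hpre matrix 0 [List.replicate ((matrix.headD []).length + 1) 0]
    rfl rfl (by simp) (fun jj' hjj' => hrep jj' hjj')
    (fun ii' hii' jj' hjj' => by interval_cases ii'; exact hrep jj' hjj')
    ii (by omega) jj hjj

-- ---------- B-side binary search ----------
theorem zexprB (matrix : List (List Int)) (h_ k : Int) (hpre : Pre_alg7b matrix h_ k)
    (i j : Nat) (s : Int) (hs : 0 ≤ s)
    (him : (i : Int) + s ≤ (matrix.length : Int))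
    (hjn : (j : Int) + s ≤ ((matrix.headD []).length : Int)) :
    ((prefB matrix h_ (matrix.headD []).length).getD ((i : Int) + s).toNat []).getD (((j : Int) + s).toNat) 0
      - ((prefB matrix h_ (matrix.headD []).length).getD i []).getD (((j : Int) + s).toNat) 0
      - ((prefB matrix h_ (matrix.headD []).length).getD ((i : Int) + s).toNat []).getD j 0
      + ((prefB matrix h_ (matrix.headD []).length).getD i []).getD j 0
      = Zc matrix h_ i j s.toNat := by
  have hidx1 : ((i : Int) + s).toNat = i + s.toNat := by omega
  have hidx2 : ((j : Int) + s).toNat = j + s.toNat := by omega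
  have hent := prefB_entry matrix h_ k hpre
  rw [hidx1, hidx2,
    hent (i + s.toNat) (by omega) (j + s.toNat) (by omega),
    hent i (by omega) (j + s.toNat) (by omega),
    hent (i + s.toNat) (by omega) j (by omega),
    hent i (by omega) j (by omega)]
  exact prefix_bridge matrix h_ i j s.toNat

theorem bsB_succ (P : List (List Int)) (kk : Int) (i j fuel : Nat) (lo hi : Int)
    (hlh : lo < hi) :
    bsB P kk i j (fuel + 1) lo hi =
      (if (P.getD ((i : Int) + PySem.Int.floordiv (lo + hi + 1) 2).toNat []).getD
            (((j : Int) + PySem.Int.floordiv (lo + hi + 1) 2).toNat) 0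
          - (P.getD i []).getD (((j : Int) + PySem.Int.floordiv (lo + hi + 1) 2).toNat) 0
          - (P.getD ((i : Int) + PySem.Int.floordiv (lo + hi + 1) 2).toNat []).getD j 0
          + (P.getD i []).getD j 0 ≤ kk
       then bsB P kk i j fuel (PySem.Int.floordiv (lo + hi + 1) 2) hi
       else bsB P kk i j fuel lo (PySem.Int.floordiv (lo + hi + 1) 2 - 1)) := by
  rw [bsB, if_pos hlh]

theorem gN_eq (matrix : List (List Int)) (h_ k : Int) (i j : Nat) :
    Nat.findGreatest (fun s => Zc matrix h_ i j s ≤ (if k > 0 then k else 0))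
      (min (matrix.length - i) ((matrix.headD []).length - j)) = gN matrix h_ k i j := rfl

theorem bsB_go (matrix : List (List Int)) (h_ k : Int) (hpre : Pre_alg7b matrix h_ k)
    (i j : Nat) (him : i < matrix.length) (hjn : j < (matrix.headD []).length) :
    ∀ (fuel : Nat) (lo hi : Int), 0 ≤ lo →
      lo ≤ ((gN matrix h_ k i j : Nat) : Int) →
      ((gN matrix h_ k i j : Nat) : Int) ≤ hi →
      hi ≤ min ((matrix.length : Int) - i) (((matrix.headD []).length : Int) - j) →
      hi - lo ≤ (fuel : Int) →
      bsB (prefB matrix h_ (matrix.headD []).length) (if k > 0 then k else 0) i j fuel lo hi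
        = ((gN matrix h_ k i j : Nat) : Int) := by
  have hkk0 : (0 : Int) ≤ (if k > 0 then k else 0) := by split <;> omega
  obtain ⟨hg1, hg2, hg3⟩ := Nat.findGreatest_eq_iff.mp (gN_eq matrix h_ k i j)
  have hZg : Zc matrix h_ i j (gN matrix h_ k i j) ≤ (if k > 0 then k else 0) := by
    rcases Nat.eq_zero_or_pos (gN matrix h_ k i j) with h0 | hp
    · rw [h0, Zc_zero]; exact hkk0
    · exact hg2 (by omega)
  intro fuel
  induction fuel with
  | zero =>
    intro lo hi h0 h1 h2 h3 h4
    simp only [bsB]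
    omega
  | succ fuel ih =>
    intro lo hi h0 h1 h2 h3 h4
    by_cases hlh : lo < hi
    · rw [bsB_succ _ _ _ _ _ _ _ hlh]
      have hbounds := PySem.Int.floordiv_two_mid_bounds (show lo + 1 ≤ hi by omega)
      rw [show lo + 1 + hi = lo + hi + 1 by ring] at hbounds
      set mid := PySem.Int.floordiv (lo + hi + 1) 2 with hmid
      have hmle : (i : Int) + mid ≤ (matrix.length : Int) := by omega
      have hmle' : (j : Int) + mid ≤ ((matrix.headD []).length : Int) := by omega
      rw [zexprB matrix h_ k hpre i j mid (by omega) hmle hmle']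
      by_cases hc : Zc matrix h_ i j mid.toNat ≤ (if k > 0 then k else 0)
      · rw [if_pos hc]
        have hmg : mid.toNat ≤ gN matrix h_ k i j := by
          by_contra hcon
          exact absurd hc (hg3 (n := mid.toNat) (by omega) (by omega))
        exact ih mid hi (by omega) (by omega) h2 h3 (by omega)
      · rw [if_neg hc]
        have hmg : ((gN matrix h_ k i j : Nat) : Int) ≤ mid - 1 := by
          by_contra hcon
          have hmn : mid.toNat ≤ gN matrix h_ k i j := by omega
          exact hc (le_trans (Zc_mono matrix h_ i j hmn) hZg)
        exact ih lo (mid - 1) h0 h1 hmg (by omega) (by omega)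
    · rw [bsB, if_neg hlh]
      omega

theorem bsB_correct (matrix : List (List Int)) (h_ k : Int) (hpre : Pre_alg7b matrix h_ k)
    (i j : Nat) (him : i < matrix.length) (hjn : j < (matrix.headD []).length) :
    sideB (prefB matrix h_ (matrix.headD []).length) (if k > 0 then k else 0)
        matrix.length (matrix.headD []).length i j
      = ((gN matrix h_ k i j : Nat) : Int) := by
  obtain ⟨hg1, _, _⟩ := Nat.findGreatest_eq_iff.mp (gN_eq matrix h_ k i j)
  unfold sideB
  exact bsB_go matrix h_ k hpre i j him hjn _ 0
    (min ((matrix.length : Int) - i) (((matrix.headD []).length : Int) - j))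
    le_rfl (by omega) (by omega) le_rfl (by omega)

-- ---------- generic argmax machinery ----------
def mxF (f : Nat × Nat → Int) (C : List (Nat × Nat)) : Int :=
  C.foldl (fun a c => max a (f c)) 0

theorem fold_argmax_char (f : Nat × Nat → Int) (hf : ∀ c, 0 ≤ f c) :
    ∀ (C : List (Nat × Nat)), C ≠ [] →
    ∃ p, C.reverse.find? (fun c => f c == mxF f C) = some p ∧
      C.foldl (fun st c => if f c ≥ st.2.2 then ((c.1 : Int) + 1, (c.2 : Int) + 1, f c) else st)
          ((0 : Int), (0 : Int), (0 : Int))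
        = ((p.1 : Int) + 1, (p.2 : Int) + 1, mxF f C) := by
  intro C
  induction C using List.reverseRecOn with
  | nil => intro h; exact absurd rfl h
  | append_singleton C c ih =>
    intro _
    have hmx : mxF f (C ++ [c]) = max (mxF f C) (f c) := by
      unfold mxF; rw [List.foldl_append]; rfl
    have hrev : (C ++ [c]).reverse = c :: C.reverse := by simp
    rcases eq_or_ne C [] with rfl | hC
    · have hm : mxF f ([] ++ [c]) = f c := by
        rw [hmx]; exact max_eq_right (hf c)
      refine ⟨c, ?_, ?_⟩
      · rw [hrev, hm]
        simp
      · rw [hm]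
        simp only [List.nil_append, List.foldl_cons, List.foldl_nil]
        rw [if_pos (show f c ≥ (((0 : Int), (0 : Int), (0 : Int)) : Int × Int × Int).2.2 from hf c)]
    · obtain ⟨p, hfind, hfold⟩ := ih hC
      rw [List.foldl_append, hfold]
      simp only [List.foldl_cons, List.foldl_nil]
      by_cases hge : f c ≥ mxF f C
      · have hm : mxF f (C ++ [c]) = f c := by rw [hmx]; exact max_eq_right hge
        rw [hm, if_pos (show f c ≥ ((((p.1 : Int) + 1, (p.2 : Int) + 1, mxF f C)) :
          Int × Int × Int).2.2 from hge), hrev]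
        exact ⟨c, by rw [List.find?_cons_of_pos (by simp)], rfl⟩
      · have hlt : f c < mxF f C := not_le.mp hge
        have hm : mxF f (C ++ [c]) = mxF f C := by rw [hmx]; exact max_eq_left (le_of_lt hlt)
        rw [hm, if_neg (show ¬ f c ≥ ((((p.1 : Int) + 1, (p.2 : Int) + 1, mxF f C)) :
          Int × Int × Int).2.2 from hge), hrev]
        refine ⟨p, ?_, rfl⟩
        rw [List.find?_cons_of_neg (by
          show ¬ (f c == mxF f C) = true
          simp only [beq_iff_eq]
          omega), hfind]

theorem mxF_nonneg (f : Nat × Nat → Int) (C : List (Nat × Nat)) : 0 ≤ mxF f C :=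
  (PySem.List.le_foldl_max_int C f 0).1

-- ===== MAIN =====
def cellsC (matrix : List (List Int)) : List (Nat × Nat) :=
  (List.range matrix.length).flatMap
    (fun i => (List.range (matrix.headD []).length).map (fun j => (i, j)))

def fG (matrix : List (List Int)) (h_ k : Int) : Nat × Nat → Int :=
  fun c => ((gN matrix h_ k c.1 c.2 : Nat) : Int)

theorem mem_cellsC (matrix : List (List Int)) (c : Nat × Nat) :
    c ∈ cellsC matrix ↔ c.1 < matrix.length ∧ c.2 < (matrix.headD []).length := by
  unfold cellsC
  simp only [List.mem_flatMap, List.mem_map, List.mem_range]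
  constructor
  · rintro ⟨i, hi, j, hj, rfl⟩; exact ⟨hi, hj⟩
  · rintro ⟨h1, h2⟩; exact ⟨c.1, h1, c.2, h2, rfl⟩

theorem bin_headD_len (matrix : List (List Int)) (h_ : Int) :
    ((matrix.map (fun row => row.map (fun v => if v < h_ then (0 : Int) else 1))).headD []).length
      = (matrix.headD []).length := by
  cases matrix <;> simp

theorem find?_congr_mem {α : Type} (l : List α) (p q : α → Bool)
    (h : ∀ x ∈ l, p x = q x) : l.find? p = l.find? q := by
  induction l with
  | nil => rfl
  | cons a t ih =>
    have ha := h a List.mem_cons_self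
    cases hpa : p a with
    | false =>
      rw [List.find?_cons_of_neg (by rw [hpa]; exact Bool.false_ne_true),
        List.find?_cons_of_neg (by rw [← ha, hpa]; exact Bool.false_ne_true),
        ih (fun x hx => h x (List.mem_cons_of_mem _ hx))]
    | true =>
      rw [List.find?_cons_of_pos hpa, List.find?_cons_of_pos (ha ▸ hpa)]

theorem finA_char (matrix : List (List Int)) (h_ k : Int) (hpre : Pre_alg7b matrix h_ k) :
    finA (dpA (prefA (matrix.map (fun row => row.map (fun v => if v < h_ then (0 : Int) else 1)))
        (matrix.headD []).length matrix.length) matrix.length (matrix.headD []).length k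
        (klistA (matrix.map (fun row => row.map (fun v => if v < h_ then (0 : Int) else 1)))
          matrix.length (matrix.headD []).length)) matrix.length (matrix.headD []).length
      = (cellsC matrix).foldl (fun st c => if fG matrix h_ k c ≥ st.2.2
          then ((c.1 : Int) + 1, (c.2 : Int) + 1, fG matrix h_ k c) else st)
        ((0 : Int), (0 : Int), (0 : Int)) := by
  unfold finA cellsC
  rw [List.foldl_flatMap]
  refine PySem.List.foldl_congr_mem _ _ _ _ ?_
  intro st i hi
  rw [List.foldl_map]
  refine PySem.List.foldl_congr_mem _ _ _ _ ?_
  intro st' j hj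
  rw [dpA_entry matrix h_ k hpre i j (List.mem_range.mp hi) (List.mem_range.mp hj)]
  rfl

theorem gridB_entry (matrix : List (List Int)) (h_ k : Int) (hpre : Pre_alg7b matrix h_ k)
    (i j : Nat) (him : i < matrix.length) (hjn : j < (matrix.headD []).length) :
    ((gridB (prefB matrix h_ (matrix.headD []).length) (if k > 0 then k else 0)
        matrix.length (matrix.headD []).length).getD i []).getD j 0 = fG matrix h_ k (i, j) := by
  unfold gridB
  rw [PySem.List.getD_map_range _ _ _ _ him, PySem.List.getD_map_range _ _ _ _ hjn,
    bsB_correct matrix h_ k hpre i j him hjn]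
  rfl

theorem maxB_char (matrix : List (List Int)) (h_ k : Int) (hpre : Pre_alg7b matrix h_ k) :
    maxB (gridB (prefB matrix h_ (matrix.headD []).length) (if k > 0 then k else 0)
        matrix.length (matrix.headD []).length) = mxF (fG matrix h_ k) (cellsC matrix) := by
  unfold maxB gridB mxF cellsC
  rw [List.foldl_map, List.foldl_flatMap]
  refine PySem.List.foldl_congr_mem _ _ _ _ ?_
  intro a i hi
  rw [List.foldl_map, List.foldl_map]
  refine PySem.List.foldl_congr_mem _ _ _ _ ?_
  intro a' j hj
  rw [bsB_correct matrix h_ k hpre i j (List.mem_range.mp hi) (List.mem_range.mp hj)]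
  show (if ((gN matrix h_ k i j : Nat) : Int) > a' then ((gN matrix h_ k i j : Nat) : Int) else a')
    = max a' ((gN matrix h_ k i j : Nat) : Int)
  split <;> omega

theorem revCells (matrix : List (List Int)) :
    (List.range matrix.length).reverse.flatMap
      (fun i => (List.range (matrix.headD []).length).reverse.map (fun j => (i, j)))
      = (cellsC matrix).reverse := by
  unfold cellsC
  rw [List.reverse_flatMap]
  simp only [Function.comp_def, List.map_reverse]

theorem findB_char (matrix : List (List Int)) (h_ k : Int) (hpre : Pre_alg7b matrix h_ k) :
    (cellsC matrix).reverse.find? (fun c =>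
        ((gridB (prefB matrix h_ (matrix.headD []).length) (if k > 0 then k else 0)
          matrix.length (matrix.headD []).length).getD c.1 []).getD c.2 0
        == maxB (gridB (prefB matrix h_ (matrix.headD []).length) (if k > 0 then k else 0)
          matrix.length (matrix.headD []).length))
      = (cellsC matrix).reverse.find? (fun c =>
          fG matrix h_ k c == mxF (fG matrix h_ k) (cellsC matrix)) := by
  refine find?_congr_mem _ _ _ ?_
  intro c hc
  have hmem := (mem_cellsC matrix c).mp (List.mem_reverse.mp hc)
  rw [gridB_entry matrix h_ k hpre c.1 c.2 hmem.1 hmem.2, maxB_char matrix h_ k hpre]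

theorem finA_n0 (dp : List (List Int)) (m : Nat) :
    finA dp m 0 = ((0 : Int), (0 : Int), (0 : Int)) := by
  unfold finA
  simp

theorem maxB_n0 (P : List (List Int)) (kk : Int) (m : Nat) : maxB (gridB P kk m 0) = 0 := by
  unfold maxB gridB
  simp only [List.range_zero, List.map_nil]
  induction m with
  | zero => simp
  | succ mm ih =>
    rw [List.range_succ, List.map_append, List.foldl_append, ih]
    simp

-- ===== VERDICT (by name: the statement is the Claim_ definition above) =====
theorem alg7b_spec : Claim_equal_alg7b := by
  intro matrix h_ k hdom hpre
  unfold Spec_alg7b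
  simp only [alg7b, alg7b_alt, List.length_map, bin_headD_len]
  rcases Nat.eq_zero_or_pos (matrix.headD []).length with hn0 | hn1
  · rw [hn0, finA_n0, maxB_n0]
    dsimp only
    rw [if_neg (by omega), if_pos rfl]
  · have hm1 : 0 < matrix.length := by
      cases matrix with
      | nil => exact absurd rfl hpre.1
      | cons a t => simp
    have hCne : cellsC matrix ≠ [] := by
      refine List.ne_nil_of_mem (a := ((0 : Nat), (0 : Nat))) ?_
      rw [mem_cellsC]
      exact ⟨hm1, hn1⟩
    obtain ⟨p, hfind, hfold⟩ := fold_argmax_char (fG matrix h_ k)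
      (fun c => Int.natCast_nonneg _) (cellsC matrix) hCne
    have hA := finA_char matrix h_ k hpre
    rw [hfold] at hA
    rw [hA, revCells matrix, findB_char matrix h_ k hpre, hfind,
      maxB_char matrix h_ k hpre]
    have hmx0 := mxF_nonneg (fG matrix h_ k) (cellsC matrix)
    dsimp only
    by_cases hone : (1 : Int) ≤ mxF (fG matrix h_ k) (cellsC matrix)
    · rw [if_pos (Or.inl (by omega)), if_neg (by omega)]
      have e1 : ((p.1 : Int) + 1 + mxF (fG matrix h_ k) (cellsC matrix) - 1 : Int)
          = (p.1 : Int) + mxF (fG matrix h_ k) (cellsC matrix) := by ring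
      have e2 : ((p.2 : Int) + 1 + mxF (fG matrix h_ k) (cellsC matrix) - 1 : Int)
          = (p.2 : Int) + mxF (fG matrix h_ k) (cellsC matrix) := by ring
      rw [e1, e2]
    · rw [if_neg (by omega), if_pos (by omega)]
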